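-- pv_equiv track=rewrite | github.com/XmchxUp/Kata | codewars/6kyu/Moves in squared strings (IV)/Moves in squared strings (IV).py | diag_2_sym
-- ===== SOURCE A (Python) =====
-- def diag_2_sym(strng):
--     # your code
--     tmp = strng.split("\n")
--     n = len(tmp)
--     res = ""
--     for j in range(n - 1, -1, -1):
--         for i in range(n - 1, -1, -1):
--             res += tmp[i][j]
--         res += "\n"
--     return res[:-1]
-- ===== SOURCE B (Python) =====
-- def diag_2_sym(strng):
--     rows = strng.split("\n")
--     n = len(rows)
--     flipped = [row[:n][::-1] for row in reversed(rows)]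
--     return "\n".join("".join(col) for col in zip(*flipped))
-- ===== Notes on version B (the rewrite author's own statement) =====
-- stated objective: idiomatic
-- what changed: Replaces the doubly descending index loop over tmp[i][j] with whole-grid operations: take the square part of each row, rotate 180 degrees (reverse rows and each row), transpose via zip(*grid) and join.
import Mathlib
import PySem

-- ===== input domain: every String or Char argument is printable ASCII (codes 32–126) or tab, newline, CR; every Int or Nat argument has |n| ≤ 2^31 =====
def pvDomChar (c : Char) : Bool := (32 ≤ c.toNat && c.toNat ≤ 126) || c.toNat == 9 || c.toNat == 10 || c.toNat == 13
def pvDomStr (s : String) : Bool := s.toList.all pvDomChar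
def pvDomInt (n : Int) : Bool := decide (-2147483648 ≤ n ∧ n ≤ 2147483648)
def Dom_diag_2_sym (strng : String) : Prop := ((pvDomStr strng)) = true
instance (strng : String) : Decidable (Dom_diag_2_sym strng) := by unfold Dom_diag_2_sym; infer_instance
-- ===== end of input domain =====

-- B replaces A's doubly descending index loop with whole-grid operations (180° rotation of the
-- square part, then a truncating transpose as Python's zip(*rows), then join); equal wherever A returns.


-- ===== PORT A =====
-- tmp[i][j] raises IndexError exactly where pyGetD/pyGet? leave range; Pre_ excludes those inputs
-- (the "" branch of the match is unreachable under Pre_).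
def diag_2_sym (strng : String) : String :=
  let tmp := (PySem.Str.split? strng "\n").getD []
  let n : Int := (tmp.length : Int)
  let res : String :=
    (PySem.List.pyRange (n - 1) (-1) (-1)).foldl (fun res j =>
      ((PySem.List.pyRange (n - 1) (-1) (-1)).foldl (fun res i =>
        res ++ (match PySem.Str.pyGet? (PySem.List.pyGetD tmp i "") j with
                | some c => String.singleton c
                | none => "")) res) ++ "\n") ""
  PySem.Str.slice res none (some (-1))

-- ===== PORT B =====
-- zip(*rows) over char rows: emits columns, truncating at the shortest row (exact for Python's zip).
def pvZipStar (rows : List (List Char)) : List (List Char) :=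
  match rows with
  | [] => []
  | r :: rs =>
    let m := rs.foldl (fun a s => min a s.length) r.length
    (List.range m).map (fun j => (r :: rs).map (fun row => row.getD j ' '))

def diag_2_sym_alt (strng : String) : String :=
  let rows := (PySem.Str.split? strng "\n").getD []
  let n : Int := (rows.length : Int)
  -- flipped = [row[:n][::-1] for row in reversed(rows)], kept as char rows
  let flipped : List (List Char) :=
    rows.reverse.map (fun row => (PySem.Str.slice row none (some n)).toList.reverse)
  PySem.Str.join "\n" ((pvZipStar flipped).map String.ofList)

-- ===== PRECONDITION & SPEC =====
-- Pre_ admits exactly the inputs on which A returns: every line at least as long as the number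
-- of lines (A reads only the first n characters of each of the n lines); on a shorter line
-- (e.g. the empty string) tmp[i][j] raises IndexError.
def Pre_diag_2_sym (strng : String) : Prop :=
  ∀ s ∈ (PySem.Str.split? strng "\n").getD [],
    ((PySem.Str.split? strng "\n").getD []).length ≤ s.toList.length
instance (strng : String) : Decidable (Pre_diag_2_sym strng) := by
  unfold Pre_diag_2_sym; infer_instance
def pvWitness_diag_2_sym : String := "ab\ncd"

def Spec_diag_2_sym (strng : String) (out : String) : Prop := out = diag_2_sym_alt strng
instance (strng : String) (out : String) : Decidable (Spec_diag_2_sym strng out) := by unfold Spec_diag_2_sym; infer_instance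

-- ===== CLAIM (what is proved, stated in full; the proofs are below) =====
def Claim_equal_diag_2_sym : Prop := ∀ (strng : String), Dom_diag_2_sym strng → Pre_diag_2_sym strng → Spec_diag_2_sym strng (diag_2_sym strng)

-- ===== LEMMAS AND PROOFS =====

-- strings are equal when their character lists are
theorem pv_str_ext {s t : String} (h : s.toList = t.toList) : s = t := by
  have := congrArg String.ofList h
  simpa using this

-- a string-appending foldl, read on the char-list side
theorem pv_foldl_append_toList {α : Type} (l : List α) (g : α → String) (init : String) :
    (l.foldl (fun r x => r ++ g x) init).toList
      = init.toList ++ l.flatMap (fun x => (g x).toList) := by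
  induction l generalizing init with
  | nil => simp
  | cons a t ih => simp [List.foldl_cons, ih]

-- rows glued each with a trailing newline, last char dropped = newline-joined rows
theorem pv_dropLast_flatMap (R : List (List Char)) (c : Char) :
    (R.flatMap (fun r => r ++ [c])).dropLast = List.intercalate [c] R := by
  induction R with
  | nil => simp [List.intercalate]
  | cons r t ih =>
    cases t with
    | nil => simp [List.intercalate]
    | cons s t' =>
      have hne : ((s :: t').flatMap (fun r => r ++ [c])) ≠ [] := by
        simp [List.flatMap_cons]
      rw [List.flatMap_cons, List.dropLast_append_of_ne_nil hne, ih]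
      simp [List.intercalate, List.intersperse]

-- a foldl min over a constant-length family
theorem pv_foldl_min_const (rs : List (List Char)) (a : Nat)
    (h : ∀ s ∈ rs, s.length = a) : rs.foldl (fun m s => min m s.length) a = a := by
  induction rs with
  | nil => rfl
  | cons s t ih =>
    have hs := h s (by simp)
    simp only [List.foldl_cons, hs, min_self]
    exact ih (fun x hx => h x (by simp [hx]))

-- the countdown range, as a map over List.range
theorem pv_range (n : Nat) : PySem.List.pyRange ((n : Int) - 1) (-1) (-1)
    = (List.range n).map (fun t : Nat => (n : Int) - 1 - (t : Int)) := by
  have h : (((n : Int) - 1) - (-1)).toNat = n := by omega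
  rw [PySem.List.pyRange_neg_one, h]

-- one output row of A (the inner loop at column j), as a char list
def pvStuff (tmp : List String) (j : Int) : List Char :=
  (PySem.List.pyRange ((tmp.length : Int) - 1) (-1) (-1)).flatMap (fun i =>
    (match PySem.Str.pyGet? (PySem.List.pyGetD tmp i "") j with
     | some c => String.singleton c
     | none => "").toList)

-- row[:n] read on the char-list side
theorem pv_slice_take (row : String) (n : Nat) :
    (PySem.Str.slice row none (some (n : Int))).toList = row.toList.take n := by
  simp [PySem.Str.slice, PySem.Chars.slice, PySem.List.slice_to_natCast]

-- the grid identity: A's rows (columns read bottom-up, right-to-left) are B's zip columns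
theorem pv_grid (tmp : List String) (hsq : ∀ s ∈ tmp, tmp.length ≤ s.toList.length) :
    (PySem.List.pyRange ((tmp.length : Int) - 1) (-1) (-1)).map (pvStuff tmp)
      = pvZipStar (tmp.reverse.map (fun row =>
          (PySem.Str.slice row none (some (tmp.length : Int))).toList.reverse)) := by
  by_cases htmp : tmp = []
  · subst htmp; simp [pvZipStar]
  · obtain ⟨r, rs, hf⟩ : ∃ r rs,
        tmp.reverse.map (fun row =>
          (PySem.Str.slice row none (some (tmp.length : Int))).toList.reverse) = r :: rs := by
      cases h : tmp.reverse.map (fun row =>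
          (PySem.Str.slice row none (some (tmp.length : Int))).toList.reverse) with
      | nil => exact absurd (by simpa using h) htmp
      | cons a b => exact ⟨a, b, rfl⟩
    have hlen : ∀ s ∈ (r :: rs), s.length = tmp.length := by
      intro s hs
      rw [← hf] at hs
      obtain ⟨row, hrow, rfl⟩ := List.mem_map.mp hs
      have hx := hsq row (List.mem_reverse.mp hrow)
      simp only [List.length_reverse, pv_slice_take, List.length_take]
      omega
    have hr : r.length = tmp.length := hlen r (by simp)
    have hm : rs.foldl (fun a s => min a s.length) r.length = tmp.length := by
      rw [hr]
      exact pv_foldl_min_const rs tmp.length (fun s hs => hlen s (by simp [hs]))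
    rw [hf]
    show _ = (List.range (rs.foldl (fun a s => min a s.length) r.length)).map
        (fun j => (r :: rs).map (fun row => row.getD j ' '))
    rw [hm, ← hf, pv_range, List.map_map]
    apply List.map_congr_left
    intro k hk
    have hkn : k < tmp.length := List.mem_range.mp hk
    show pvStuff tmp ((tmp.length : Int) - 1 - k)
        = (tmp.reverse.map (fun row =>
            (PySem.Str.slice row none (some (tmp.length : Int))).toList.reverse)).map
          (fun row => row.getD k ' ')
    rw [List.map_map]
    unfold pvStuff
    rw [pv_range, List.flatMap_map]
    have hbody : ∀ t ∈ List.range tmp.length,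
        (match PySem.Str.pyGet? (PySem.List.pyGetD tmp ((tmp.length : Int) - 1 - (t : Int)) "")
            ((tmp.length : Int) - 1 - (k : Int)) with
          | some c => String.singleton c
          | none => "").toList
        = [(tmp.getD (tmp.length - 1 - t) "").toList.getD (tmp.length - 1 - k) ' '] := by
      intro t ht
      have htn : t < tmp.length := List.mem_range.mp ht
      have hci : ((tmp.length : Int) - 1 - t) = ((tmp.length - 1 - t : Nat) : Int) := by omega
      have hck : ((tmp.length : Int) - 1 - k) = ((tmp.length - 1 - k : Nat) : Int) := by omega
      simp only [hci, hck, PySem.List.pyGetD_natCast]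
      have hmem : tmp.getD (tmp.length - 1 - t) "" ∈ tmp := by
        rw [List.getD_eq_getElem _ _ (by omega)]
        exact List.getElem_mem _
      have hslen : tmp.length ≤ (tmp.getD (tmp.length - 1 - t) "").toList.length :=
        hsq _ hmem
      have hjr : tmp.length - 1 - k < (tmp.getD (tmp.length - 1 - t) "").toList.length := by
        omega
      have hget : PySem.Str.pyGet? (tmp.getD (tmp.length - 1 - t) "")
          ((tmp.length - 1 - k : Nat) : Int)
          = some ((tmp.getD (tmp.length - 1 - t) "").toList[tmp.length - 1 - k]) := by
        show PySem.List.pyGet? (tmp.getD (tmp.length - 1 - t) "").toList _ = _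
        rw [PySem.List.pyGet?_natCast, List.getElem?_eq_getElem hjr]
      rw [hget, List.getD_eq_getElem _ _ hjr]
      simp
    have hsing : (List.range tmp.length).flatMap
        (fun a => [(tmp.getD (tmp.length - 1 - a) "").toList.getD (tmp.length - 1 - k) ' '])
        = (List.range tmp.length).map
          (fun a => (tmp.getD (tmp.length - 1 - a) "").toList.getD (tmp.length - 1 - k) ' ') :=
      (List.map_eq_flatMap ..).symm
    rw [List.flatMap_def, List.map_congr_left hbody, ← List.flatMap_def, hsing]
    apply List.ext_getElem (by simp)
    intro t h1 h2
    have h1n : t < tmp.length := by simpa using h1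
    simp only [List.getElem_map, List.getElem_range, Function.comp_apply, List.getElem_reverse]
    have e1 : tmp.getD (tmp.length - 1 - t) "" = tmp[tmp.length - 1 - t]'(by omega) :=
      List.getD_eq_getElem _ _ (by omega)
    have hlen2 : tmp.length ≤ (tmp[tmp.length - 1 - t]'(by omega)).toList.length :=
      hsq _ (List.getElem_mem _)
    rw [e1, pv_slice_take]
    rw [List.getD_eq_getElem _ _ (by omega),
      List.getD_eq_getElem _ _ (by simp only [List.length_reverse, List.length_take]; omega),
      List.getElem_reverse, List.getElem_take]
    congr 1
    simp only [List.length_take]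
    omega

-- the abstract core: on lines at least as long as their number, A's nested loop equals B
theorem pv_main (tmp : List String)
    (hsq : ∀ s ∈ tmp, tmp.length ≤ s.toList.length) :
    (PySem.Str.slice
      ((PySem.List.pyRange ((tmp.length : Int) - 1) (-1) (-1)).foldl (fun res j =>
        ((PySem.List.pyRange ((tmp.length : Int) - 1) (-1) (-1)).foldl (fun res i =>
          res ++ (match PySem.Str.pyGet? (PySem.List.pyGetD tmp i "") j with
                  | some c => String.singleton c
                  | none => "")) res) ++ "\n") "")
      none (some (-1)))
    = PySem.Str.join "\n"
        ((pvZipStar (tmp.reverse.map (fun row =>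
            (PySem.Str.slice row none (some (tmp.length : Int))).toList.reverse))).map
          String.ofList) := by
  apply pv_str_ext
  have hfun : (fun (res : String) (j : Int) =>
      ((PySem.List.pyRange ((tmp.length : Int) - 1) (-1) (-1)).foldl (fun res i =>
        res ++ (match PySem.Str.pyGet? (PySem.List.pyGetD tmp i "") j with
                | some c => String.singleton c
                | none => "")) res) ++ "\n")
      = (fun (res : String) (j : Int) => res ++ (String.ofList (pvStuff tmp j) ++ "\n")) := by
    funext res j
    apply pv_str_ext
    simp [pv_foldl_append_toList, pvStuff, List.append_assoc]
  rw [hfun]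
  simp only [PySem.Str.slice, pv_foldl_append_toList]
  have hflat : ∀ j : Int, (String.ofList (pvStuff tmp j) ++ ("\n" : String)).toList
      = pvStuff tmp j ++ ['\n'] := by
    intro j; simp
  simp only [hflat]
  have h1 : (PySem.List.pyRange ((tmp.length : Int) - 1) (-1) (-1)).flatMap
      (fun j => pvStuff tmp j ++ ['\n'])
      = ((PySem.List.pyRange ((tmp.length : Int) - 1) (-1) (-1)).map (pvStuff tmp)).flatMap
        (fun row => row ++ ['\n']) := by
    rw [List.flatMap_map]
  have h2 : ∀ L : List Char,
      (String.ofList (PySem.Chars.slice L none (some (-1)))).toList = L.dropLast := by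
    intro L
    simp [PySem.Chars.slice, PySem.List.slice_to_neg_one]
  rw [show (("" : String).toList = ([] : List Char)) from rfl, List.nil_append, h1, h2,
    pv_dropLast_flatMap, pv_grid tmp hsq]
  simp [PySem.Str.join, PySem.Chars.join, List.map_map, Function.comp_def]

-- ===== VERDICT (by name: the statement is the Claim_ definition above) =====
theorem diag_2_sym_spec : Claim_equal_diag_2_sym := by
  intro strng _ hpre
  unfold Spec_diag_2_sym diag_2_sym diag_2_sym_alt
  exact pv_main _ hpre
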